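-- pv_equiv track=rewrite | github.com/amrithajayadev/misc | binary_trees/binary-searchtree_from-sorted_array.py | even_and_is_decreasing
-- ===== SOURCE A (Python) =====
-- def even_and_is_decreasing(nums):
--     if len(nums) == 1:
--         if nums[0] % 2 == 0:
--             return True
--         else:
--             return False
--     for i in range(1, len(nums)):
--         if (nums[i] > nums[i - 1]) or nums[i] % 2 != 0 or nums[i - 1] % 2 != 0:
--             return False
--     return True
-- ===== SOURCE B (Python) =====
-- def even_and_is_decreasing(nums):
--     return all(x % 2 == 0 for x in nums) and nums == sorted(nums, reverse=True)
-- ===== Notes on version B (the rewrite author's own statement) =====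
-- stated objective: simpler
-- what changed: Replaces A's index-based adjacent-pair scan with a singleton special case by an all() parity check plus comparison with the descending-sorted copy, handling all lengths uniformly.
import Mathlib
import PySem

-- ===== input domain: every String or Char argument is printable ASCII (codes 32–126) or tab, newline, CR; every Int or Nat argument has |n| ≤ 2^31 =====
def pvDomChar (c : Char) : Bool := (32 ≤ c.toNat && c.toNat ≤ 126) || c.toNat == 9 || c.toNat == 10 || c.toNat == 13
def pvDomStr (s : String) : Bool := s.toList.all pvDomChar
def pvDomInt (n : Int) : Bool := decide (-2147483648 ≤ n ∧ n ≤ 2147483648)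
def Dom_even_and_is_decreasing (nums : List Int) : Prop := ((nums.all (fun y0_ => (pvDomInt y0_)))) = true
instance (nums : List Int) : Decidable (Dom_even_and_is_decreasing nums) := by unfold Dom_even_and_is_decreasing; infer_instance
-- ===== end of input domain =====

-- B replaces A's index-based adjacent-pair scan (with a singleton special case) by an
-- all() parity check plus comparison with the descending-sorted copy; objective: simpler.

-- ===== PORT A =====
-- the 'for i in range(1, len(nums))' loop with its early 'return False'
def evenDecLoop (nums : List Int) : List Int → Bool
  | [] => true
  | i :: rest =>
    if (PySem.List.pyGetD nums i 0 > PySem.List.pyGetD nums (i - 1) 0) ||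
       (PySem.Int.mod (PySem.List.pyGetD nums i 0) 2 ≠ 0) ||
       (PySem.Int.mod (PySem.List.pyGetD nums (i - 1) 0) 2 ≠ 0) then false
    else evenDecLoop nums rest

def even_and_is_decreasing (nums : List Int) : Bool :=
  if PySem.List.len nums = 1 then
    if PySem.Int.mod (PySem.List.pyGetD nums 0 0) 2 = 0 then true else false
  else
    evenDecLoop nums (PySem.List.pyRange 1 (PySem.List.len nums) 1)

-- ===== PORT B =====
def even_and_is_decreasing_alt (nums : List Int) : Bool :=
  nums.all (fun x => PySem.Int.mod x 2 = 0) &&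
  decide (nums = PySem.List.sorted nums (fun x => x) true)

-- ===== PRECONDITION & SPEC =====
def Spec_even_and_is_decreasing (nums : List Int) (out : Bool) : Prop := out = even_and_is_decreasing_alt nums
instance (nums : List Int) (out : Bool) : Decidable (Spec_even_and_is_decreasing nums out) := by unfold Spec_even_and_is_decreasing; infer_instance

-- ===== CLAIM (what is proved, stated in full; the proofs are below) =====
def Claim_equal_even_and_is_decreasing : Prop := ∀ (nums : List Int), Dom_even_and_is_decreasing nums → Spec_even_and_is_decreasing nums (even_and_is_decreasing nums)

-- ===== LEMMAS AND PROOFS =====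

-- A's loop returns True iff no index in the range is "bad"
theorem evenDecLoop_eq_true_iff (nums : List Int) (is : List Int) :
    evenDecLoop nums is = true ↔
      ∀ i ∈ is, PySem.List.pyGetD nums i 0 ≤ PySem.List.pyGetD nums (i - 1) 0 ∧
        PySem.Int.mod (PySem.List.pyGetD nums i 0) 2 = 0 ∧
        PySem.Int.mod (PySem.List.pyGetD nums (i - 1) 0) 2 = 0 := by
  induction is with
  | nil => simp [evenDecLoop]
  | cons i rest ih =>
    simp only [evenDecLoop]
    split
    · rename_i h
      simp only [Bool.or_eq_true, decide_eq_true_eq, gt_iff_lt, ne_eq] at h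
      constructor
      · intro h'; exact absurd h' (by simp)
      · intro h'
        have := h' i (by simp)
        omega
    · rename_i h
      simp only [Bool.or_eq_true, decide_eq_true_eq, gt_iff_lt, ne_eq] at h
      push Not at h
      rw [ih]
      constructor
      · intro h' j hj
        rcases List.mem_cons.mp hj with rfl | hj
        · exact ⟨le_of_not_gt (by omega), h.1.2, h.2⟩
        · exact h' j hj
      · intro h' j hj; exact h' j (List.mem_cons_of_mem _ hj)

-- Pairwise non-increasing ↔ all adjacent pairs non-increasing (via indices)
theorem adjacent_le_iff_pairwise (nums : List Int) :
    (∀ k : Nat, k + 1 < nums.length → nums[k + 1]! ≤ nums[k]!) ↔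
      nums.Pairwise (fun a b => b ≤ a) := by
  rw [← List.isChain_iff_pairwise, List.isChain_iff_getElem]
  constructor
  · intro h i hi
    have := h i hi
    rwa [getElem!_pos nums (i + 1) hi, getElem!_pos nums i (Nat.lt_of_succ_lt hi)] at this
  · intro h k hk
    have := h k hk
    rwa [getElem!_pos nums (k + 1) hk, getElem!_pos nums k (Nat.lt_of_succ_lt hk)]

-- B = true ↔ all even and pairwise non-increasing
theorem alt_eq_true_iff (nums : List Int) :
    even_and_is_decreasing_alt nums = true ↔
      (∀ x ∈ nums, PySem.Int.mod x 2 = 0) ∧ nums.Pairwise (fun a b => b ≤ a) := by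
  simp only [even_and_is_decreasing_alt, Bool.and_eq_true, List.all_eq_true,
    decide_eq_true_eq]
  constructor
  · rintro ⟨h1, h2⟩
    refine ⟨h1, ?_⟩
    rw [h2]
    simpa using PySem.List.sorted_pairwise_rev nums (fun x => x)
  · rintro ⟨h1, h2⟩
    exact ⟨h1, (PySem.List.sorted_rev_eq_self_of_pairwise nums (fun x => x)
      (by simpa using h2)).symm⟩

theorem a_eq_b (nums : List Int) :
    even_and_is_decreasing nums = even_and_is_decreasing_alt nums := by
  match nums with
  | [] => decide
  | [x] =>
    simp only [even_and_is_decreasing, even_and_is_decreasing_alt]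
    have hs : PySem.List.sorted [x] (fun y => y) true = [x] :=
      PySem.List.sorted_rev_eq_self_of_pairwise [x] (fun y => y) (by simp)
    simp [PySem.List.len, PySem.List.pyGetD, hs]
  | x :: y :: rest =>
    set l : List Int := x :: y :: rest with hl
    have hn2 : 2 ≤ l.length := by simp [hl]
    have hne : PySem.List.len l ≠ 1 := by
      rw [PySem.List.len_eq, hl]; simp; omega
    rw [even_and_is_decreasing, if_neg hne]
    rw [Bool.eq_iff_iff, evenDecLoop_eq_true_iff, alt_eq_true_iff]
    have hrange : ∀ i : Int, i ∈ PySem.List.pyRange 1 (PySem.List.len l) 1 ↔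
        1 ≤ i ∧ i < l.length := by
      intro i
      rw [PySem.List.len_eq]
      exact PySem.List.mem_pyRange_one
    have hget : ∀ i : Int, 1 ≤ i → i < l.length →
        PySem.List.pyGetD l i 0 = l[i.toNat]! ∧
        PySem.List.pyGetD l (i - 1) 0 = l[(i - 1).toNat]! := by
      intro i h1 h2
      have hi : i.toNat < l.length := by omega
      have hi' : (i - 1).toNat < l.length := by omega
      rw [PySem.List.pyGetD_eq_getElem l 0 (by omega) (by exact_mod_cast h2),
          PySem.List.pyGetD_eq_getElem l 0 (by omega) (by omega)]
      rw [getElem!_pos l i.toNat hi, getElem!_pos l (i - 1).toNat hi']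
      exact ⟨rfl, rfl⟩
    constructor
    · intro h
      constructor
      · -- all even
        intro z hz
        obtain ⟨k, hk, rfl⟩ := List.mem_iff_getElem.mp hz
        rcases Nat.eq_zero_or_pos k with rfl | hkpos
        · have h1 := h 1 (by rw [hrange]; constructor <;> omega)
          obtain ⟨_, g2⟩ := hget 1 (by omega) (by omega)
          rw [g2] at h1
          have : ((1 : Int) - 1).toNat = 0 := by decide
          rw [this] at h1
          rw [← getElem!_pos l 0 hk]
          exact h1.2.2
        · have hmem : (k : Int) ∈ PySem.List.pyRange 1 (PySem.List.len l) 1 := by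
            rw [hrange]; constructor <;> [exact_mod_cast hkpos; exact_mod_cast hk]
          have hk' := h _ hmem
          obtain ⟨g1, _⟩ := hget k (by exact_mod_cast hkpos) (by exact_mod_cast hk)
          rw [g1] at hk'
          simp only [Int.toNat_natCast] at hk'
          rw [← getElem!_pos l k hk]
          exact hk'.2.1
      · -- pairwise
        rw [← adjacent_le_iff_pairwise]
        intro k hk
        have hmem : ((k : Int) + 1) ∈ PySem.List.pyRange 1 (PySem.List.len l) 1 := by
          rw [hrange]; constructor <;> [omega; exact_mod_cast hk]
        have hk' := h _ hmem
        obtain ⟨g1, g2⟩ := hget ((k : Int) + 1) (by omega) (by exact_mod_cast hk)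
        rw [g1, g2] at hk'
        have e1 : ((k : Int) + 1).toNat = k + 1 := by omega
        have e2 : ((k : Int) + 1 - 1).toNat = k := by omega
        rw [e1, e2] at hk'
        exact hk'.1
    · rintro ⟨heven, hpair⟩ i hi
      rw [hrange] at hi
      obtain ⟨hi1, hi2⟩ := hi
      obtain ⟨g1, g2⟩ := hget i hi1 hi2
      rw [g1, g2]
      have hlt : i.toNat < l.length := by omega
      have hlt' : (i - 1).toNat < l.length := by omega
      have hadj := (adjacent_le_iff_pairwise l).mpr hpair (i - 1).toNat (by omega)
      have e : (i - 1).toNat + 1 = i.toNat := by omega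
      rw [e] at hadj
      refine ⟨hadj, ?_, ?_⟩
      · rw [getElem!_pos l i.toNat hlt]
        exact heven _ (List.getElem_mem hlt)
      · rw [getElem!_pos l (i - 1).toNat hlt']
        exact heven _ (List.getElem_mem hlt')

-- ===== VERDICT (by name: the statement is the Claim_ definition above) =====
theorem even_and_is_decreasing_spec : Claim_equal_even_and_is_decreasing := by
  intro nums _
  unfold Spec_even_and_is_decreasing
  exact a_eq_b nums
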